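-- pv_equiv track=rewrite | github.com/VarGun/Algorithm | 프로그래머스/3/389481. 봉인된 주문/봉인된 주문.py | solution
-- ===== SOURCE A (Python) =====
-- def get_rank(s):
--     total = 0
--     for i in range(1, len(s)):
--         total += 26 ** i
--     val = 0
--     for i in range(len(s)):
--         val = val * 26 + (ord(s[i]) - 97)
--     return total + val + 1 # 순위가 1부터 시작하니까
--
-- def get_word(n):
--     length = 1
--     while n > 26 ** length:
--         n -= 26 ** length
--         length += 1
--     n -= 1 # 순위가 1부터 시작했으니까
--     word = ""
--     for _ in range(length):
--         word += chr(97 + n % 26)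
--         n //= 26
--     return word[::-1]
--
-- def solution(n, bans):
--     answer = ''
--     bans.sort(key = lambda x : (len(x), x))
--     cnt = 0 # 지울 단어 수 (bans 에서 n 보다 순위가 낮은 애들 수)
--     for b in bans:
--         if(get_rank(b) > n + cnt): # 밀릴 수 있으니까
--             break
--         cnt += 1
--
--     return get_word(n + cnt)
-- ===== SOURCE B (Python) =====
-- def rank_of(s):
--     L = len(s)
--     prefix = (26 ** L - 26) // 25 if L else 0
--     val = sum((ord(c) - 97) * 26 ** (L - 1 - i) for i, c in enumerate(s))
--     return prefix + val + 1
--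
-- def build(length, m):
--     if length == 0:
--         return ""
--     return build(length - 1, m // 26) + chr(97 + m % 26)
--
-- def word_of(m, length=1):
--     if m > 26 ** length:
--         return word_of(m - 26 ** length, length + 1)
--     return build(length, m - 1)
--
-- def solution(n, bans):
--     bans.sort(key=lambda x: (len(x), x))
--     ranks = [rank_of(b) for b in bans]
--     shift = next((i for i, r in enumerate(ranks) if r - i > n), len(ranks))
--     return word_of(n + shift)
-- ===== Notes on version B (the rewrite author's own statement) =====
-- stated objective: alternative
-- what changed: Replaces A's three accumulation loops: the length-prefix loop becomes a closed-form geometric sum (26**L-26)//25, the Horner digit loop becomes a positional enumerate-weighted sum, the break-counting shift loop becomes a first-index search over rank-index, and the word is built high-digit-first by recursion instead of appended-then-reversed.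
import Mathlib
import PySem

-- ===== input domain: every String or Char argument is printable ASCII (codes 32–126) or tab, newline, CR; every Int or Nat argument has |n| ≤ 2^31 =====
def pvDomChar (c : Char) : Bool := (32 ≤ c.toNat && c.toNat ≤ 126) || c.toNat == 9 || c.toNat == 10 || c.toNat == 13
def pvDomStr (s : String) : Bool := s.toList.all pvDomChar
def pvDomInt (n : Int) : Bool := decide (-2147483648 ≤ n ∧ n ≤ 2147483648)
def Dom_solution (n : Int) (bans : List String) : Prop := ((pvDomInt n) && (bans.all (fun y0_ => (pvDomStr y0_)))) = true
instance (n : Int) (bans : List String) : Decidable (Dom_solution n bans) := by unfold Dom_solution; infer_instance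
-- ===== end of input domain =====

-- B replaces A's three accumulation loops by closed forms / structural recursion: a closed-form
-- geometric sum and a positional digit sum in rank_of, a first-index search for the shift, and a
-- front-building recursion for the word (objective: alternative; same cost).
-- NOTE: Python A sorts `bans` in place; this file proves equality of the RETURN values only
-- (Python B performs the same in-place sort).

-- ===== PORT A =====
-- get_rank: prefix-count loop over range(1, len(s)) plus a Horner loop over the characters
def get_rank (s : String) : Int :=
  let total := (PySem.List.pyRange 1 (PySem.Str.len s)).foldl (fun acc i => acc + 26 ^ i.toNat) 0
  let val := s.toList.foldl (fun v c => v * 26 + ((c.toNat : Int) - 97)) 0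
  total + val + 1

-- the `while n > 26 ** length` loop of get_word
def get_word_peel (n : Int) (length : Nat) : Int × Nat :=
  if n > 26 ^ length then
    get_word_peel (n - 26 ^ length) (length + 1)
  else (n, length)
termination_by n.toNat
decreasing_by
  have h1 : (1 : Int) ≤ 26 ^ length := one_le_pow₀ (by norm_num)
  omega

-- get_word: peel the length, then `for _ in range(length): word += chr(97 + n % 26); n //= 26`,
-- finally word[::-1]; the word is built as a List Char (PySem convention) and packed at the end
def get_word (n : Int) : String :=
  let p := get_word_peel n 1
  let st := (List.range p.2).foldl
      (fun (st : List Char × Int) _ =>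
        (st.1 ++ [Char.ofNat (97 + (PySem.Int.mod st.2 26)).toNat], PySem.Int.floordiv st.2 26))
      ([], p.1 - 1)
  String.ofList st.1.reverse

-- the `for b in bans: if get_rank(b) > n + cnt: break; cnt += 1` loop
def cnt_loop (n : Int) : List String → Int → Int
  | [], cnt => cnt
  | b :: rest, cnt => if get_rank b > n + cnt then cnt else cnt_loop n rest (cnt + 1)

def solution (n : Int) (bans : List String) : String :=
  let sortedBans := PySem.List.sorted2 bans (fun x => PySem.Str.len x) (fun x => x)
  get_word (n + cnt_loop n sortedBans 0)

-- ===== PORT B =====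
-- rank_of: closed-form geometric prefix and a positional (enumerate-weighted) digit sum
def rank_of (s : String) : Int :=
  let L := PySem.Str.len s
  let pre := if L ≠ 0 then PySem.Int.floordiv (26 ^ L.toNat - 26) 25 else 0
  let val := ((PySem.List.enumerate s.toList).map
      (fun p => ((p.2.toNat : Int) - 97) * 26 ^ (L - 1 - p.1).toNat)).sum
  pre + val + 1

-- build(length, m): recursive, high digit first (string modelled as List Char)
def build : Nat → Int → List Char
  | 0, _ => []
  | length + 1, m =>
      build length (PySem.Int.floordiv m 26) ++ [Char.ofNat (97 + (PySem.Int.mod m 26)).toNat]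

def word_of (m : Int) (length : Nat) : String :=
  if m > 26 ^ length then word_of (m - 26 ^ length) (length + 1)
  else String.ofList (build length (m - 1))
termination_by m.toNat
decreasing_by
  have h1 : (1 : Int) ≤ 26 ^ length := one_le_pow₀ (by norm_num)
  omega

-- next((i for i, r in enumerate(ranks) if r - i > n), len(ranks))
def next_idx (n : Int) : List (Int × Int) → Option Int
  | [] => none
  | (i, r) :: rest => if r - i > n then some i else next_idx n rest

def solution_alt (n : Int) (bans : List String) : String :=
  let sortedBans := PySem.List.sorted2 bans (fun x => PySem.Str.len x) (fun x => x)
  let ranks := sortedBans.map rank_of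
  let shift := (next_idx n (PySem.List.enumerate ranks)).getD (ranks.length : Int)
  word_of (n + shift) 1

-- ===== PRECONDITION & SPEC =====
def Spec_solution (n : Int) (bans : List String) (out : String) : Prop := out = solution_alt n bans
instance (n : Int) (bans : List String) (out : String) : Decidable (Spec_solution n bans out) := by unfold Spec_solution; infer_instance

-- ===== CLAIM (what is proved, stated in full; the proofs are below) =====
def Claim_equal_solution : Prop := ∀ (n : Int) (bans : List String), Dom_solution n bans → Spec_solution n bans (solution n bans)

-- ===== LEMMAS AND PROOFS =====

-- (a) A's prefix loop, times 25, telescopes to the closed-form numerator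
theorem prefix_mul (L : Nat) :
    (PySem.List.pyRange 1 (L : Int)).foldl (fun acc i => acc + 26 ^ i.toNat) (0 : Int) * 25
      = if L ≠ 0 then 26 ^ L - 26 else 0 := by
  induction L with
  | zero => decide
  | succ L ih =>
    rcases Nat.eq_zero_or_pos L with h | h
    · subst h; decide
    · have hc : ((L + 1 : Nat) : Int) = (L : Int) + 1 := by push_cast; ring
      have hr : PySem.List.pyRange 1 ((L : Int) + 1) = PySem.List.pyRange 1 (L : Int) ++ [(L : Int)] :=
        PySem.List.pyRange_one_succ_right (by exact_mod_cast h)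
      rw [hc, hr, List.foldl_append]
      simp only [List.foldl, Int.toNat_natCast]
      rw [if_pos (by omega), add_mul]
      rw [if_pos (by omega)] at ih
      rw [ih, pow_succ]
      ring

-- hence A's prefix loop equals B's floor-division closed form
theorem prefix_eq (L : Nat) :
    (PySem.List.pyRange 1 (L : Int)).foldl (fun acc i => acc + 26 ^ i.toNat) (0 : Int)
      = if L ≠ 0 then PySem.Int.floordiv (26 ^ L - 26) 25 else 0 := by
  rcases Nat.eq_zero_or_pos L with h | h
  · subst h; decide
  · rw [if_pos (by omega)]
    have hm := prefix_mul L
    rw [if_pos (by omega)] at hm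
    rw [← hm, PySem.Int.floordiv_eq_ediv_of_pos (by norm_num)]
    exact (Int.mul_ediv_cancel _ (by norm_num)).symm

theorem enum_append (l : List Char) (c : Char) (j : Int) :
    PySem.List.enumerate (l ++ [c]) j
      = PySem.List.enumerate l j ++ [(j + l.length, c)] := by
  induction l generalizing j with
  | nil => simp [PySem.List.enumerate]
  | cons a t ih =>
    simp only [List.cons_append, PySem.List.enumerate, ih, List.cons.injEq, true_and]
    norm_num
    ring

theorem enum_mem_bound (l : List Char) (j : Int) (p : Int × Char)
    (hp : p ∈ PySem.List.enumerate l j) : j ≤ p.1 ∧ p.1 < j + l.length := by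
  induction l generalizing j with
  | nil => simp [PySem.List.enumerate] at hp
  | cons a t ih =>
    simp only [PySem.List.enumerate, List.mem_cons] at hp
    rcases hp with h | h
    · subst h
      constructor
      · simp
      · simp only [List.length_cons]
        push_cast
        omega
    · have := ih (j + 1) h
      simp only [List.length_cons]
      push_cast
      omega

-- (b) A's Horner loop equals B's positional (enumerate-weighted) digit sum
theorem horner_eq (cs : List Char) :
    cs.foldl (fun v c => v * 26 + ((c.toNat : Int) - 97)) (0 : Int)
      = ((PySem.List.enumerate cs).map
          (fun p => ((p.2.toNat : Int) - 97) * 26 ^ (((cs.length : Int)) - 1 - p.1).toNat)).sum := by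
  induction cs using List.reverseRecOn with
  | nil => simp [PySem.List.enumerate]
  | append_singleton l c ih =>
    rw [List.foldl_append]
    simp only [List.foldl]
    rw [enum_append, List.map_append, List.sum_append]
    simp only [List.map_cons, List.map_nil, List.sum_cons, List.sum_nil]
    have hlast : (((l ++ [c]).length : Int) - 1 - (0 + (l.length : Int))).toNat = 0 := by
      simp
    rw [hlast]
    have hmap : (PySem.List.enumerate l).map
        (fun p => ((p.2.toNat : Int) - 97) * 26 ^ ((((l ++ [c]).length : Int)) - 1 - p.1).toNat)
        = (PySem.List.enumerate l).map
        (fun p => (((p.2.toNat : Int) - 97) * 26 ^ (((l.length : Int)) - 1 - p.1).toNat) * 26) := by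
      apply List.map_congr_left
      intro p hp
      have hb := enum_mem_bound l 0 p hp
      have he : ((((l ++ [c]).length : Int)) - 1 - p.1).toNat
          = (((l.length : Int)) - 1 - p.1).toNat + 1 := by
        simp only [List.length_append, List.length_cons, List.length_nil]
        push_cast
        omega
      rw [he, pow_succ]
      ring
    rw [hmap, List.sum_map_mul_right, ← ih]
    ring

theorem rank_eq (s : String) : get_rank s = rank_of s := by
  unfold get_rank rank_of
  have hl : PySem.Str.len s = (s.toList.length : Int) := by simp [PySem.Str.len_eq]
  simp only [hl, Int.toNat_natCast]
  rw [prefix_eq, horner_eq]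
  simp

-- (c) B's first-index search over (rank − index) equals A's break-counting loop
theorem shift_eq (n : Int) (l : List String) (c : Int) :
    (next_idx n (PySem.List.enumerate (l.map get_rank) c)).getD (c + l.length)
      = cnt_loop n l c := by
  induction l generalizing c with
  | nil => simp [next_idx, cnt_loop]
  | cons b rest ih =>
    simp only [List.map_cons, PySem.List.enumerate, next_idx, cnt_loop]
    by_cases h : get_rank b - c > n
    · rw [if_pos h, if_pos (by omega)]
      rfl
    · rw [if_neg h, if_neg (by omega)]
      have := ih (c + 1)
      rw [← this]
      congr 1
      simp only [List.length_cons]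
      push_cast
      ring

-- a fold whose step ignores the list element is an iterate of the step
theorem foldl_const_step {σ β : Type} (f : σ → σ) (l : List β) (st : σ) :
    l.foldl (fun s _ => f s) st = f^[l.length] st := by
  induction l generalizing st with
  | nil => rfl
  | cons a t ih => simp [List.foldl, ih, Function.iterate_succ_apply]

-- (d) A's append-low-digits state machine produces B's word reversed
theorem iter_build (k : Nat) : ∀ (x : Int) (acc : List Char),
    ((fun (st : List Char × Int) =>
        (st.1 ++ [Char.ofNat (97 + (PySem.Int.mod st.2 26)).toNat], PySem.Int.floordiv st.2 26))^[k]
      (acc, x)).1 = acc ++ (build k x).reverse := by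
  induction k with
  | zero => intro x acc; simp [build]
  | succ k ih =>
    intro x acc
    rw [Function.iterate_succ_apply]
    simp only []
    rw [ih]
    simp [build, List.reverse_append]

-- B's word_of computes A's peel-then-fold-then-reverse pipeline
theorem word_of_peel (m : Int) (len : Nat) :
    word_of m len
      = String.ofList ((((List.range (get_word_peel m len).2).foldl
          (fun (st : List Char × Int) _ =>
            (st.1 ++ [Char.ofNat (97 + (PySem.Int.mod st.2 26)).toNat], PySem.Int.floordiv st.2 26))
          ([], (get_word_peel m len).1 - 1))).1.reverse) := by
  induction m, len using word_of.induct with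
  | case1 m len h ih =>
    rw [word_of, if_pos h, ih]
    conv_rhs => rw [get_word_peel, if_pos h]
  | case2 m len h =>
    rw [word_of, if_neg h, get_word_peel, if_neg h]
    rw [foldl_const_step, List.length_range, iter_build]
    simp

theorem word_eq (m : Int) : get_word m = word_of m 1 := by
  rw [get_word, word_of_peel]

theorem solution_eq (n : Int) (bans : List String) : solution n bans = solution_alt n bans := by
  unfold solution solution_alt
  have hrk : rank_of = get_rank := funext fun s => (rank_eq s).symm
  simp only [hrk]
  have hd : (((PySem.List.sorted2 bans (fun x => PySem.Str.len x) (fun x => x)).map get_rank).length : Int)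
      = 0 + ((PySem.List.sorted2 bans (fun x => PySem.Str.len x) (fun x => x)).length : Int) := by
    simp
  rw [hd, shift_eq, word_eq]

-- ===== VERDICT (by name: the statement is the Claim_ definition above) =====
theorem solution_spec : Claim_equal_solution := by
  intro n bans _
  unfold Spec_solution
  exact solution_eq n bans
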